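-- pv_equiv track=rewrite | github.com/JunseoMin/RoadToDiamond | Python3/프로그래머스/2/42626. 더 맵게/더 맵게.py | solution
-- ===== SOURCE A (Python) =====
-- import heapq
--
-- def solution(scoville, K):
--     answer = 0
--     heapq.heapify(scoville)
--     if scoville[0] >= K:
--         return 0
--
--     while len(scoville) >= 2:
--         small1 = heapq.heappop(scoville)
--         small2 = heapq.heappop(scoville)
--
--         new = small1 + small2 * 2
--
--         heapq.heappush(scoville , new)
--
--         answer += 1
--
--         if scoville[0] >= K:
--             return answer
--     return -1
-- ===== SOURCE B (Python) =====
-- def solution(scoville, K):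
--     # Sorted-list version: sort once, repeatedly pop the two smallest from the
--     # front and reinsert the mix at its ordered position (return value equal to
--     # the heap version; the caller's list ends up sorted rather than heap-ordered).
--     scoville.sort()
--     if scoville[0] >= K:
--         return 0
--     answer = 0
--     while len(scoville) >= 2:
--         small1 = scoville.pop(0)
--         small2 = scoville.pop(0)
--         new = small1 + small2 * 2
--         i = 0
--         while i < len(scoville) and scoville[i] <= new:
--             i += 1
--         scoville.insert(i, new)
--         answer += 1
--         if scoville[0] >= K:
--             return answer
--     return -1
-- ===== Notes on version B (the rewrite author's own statement) =====
-- stated objective: alternative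
-- what changed: Replaces the binary heap with a sorted list: sort once, pop the two smallest from the front, reinsert the mix by ordered insertion; return 0 / answer / -1 under the same guards.
import Mathlib
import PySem

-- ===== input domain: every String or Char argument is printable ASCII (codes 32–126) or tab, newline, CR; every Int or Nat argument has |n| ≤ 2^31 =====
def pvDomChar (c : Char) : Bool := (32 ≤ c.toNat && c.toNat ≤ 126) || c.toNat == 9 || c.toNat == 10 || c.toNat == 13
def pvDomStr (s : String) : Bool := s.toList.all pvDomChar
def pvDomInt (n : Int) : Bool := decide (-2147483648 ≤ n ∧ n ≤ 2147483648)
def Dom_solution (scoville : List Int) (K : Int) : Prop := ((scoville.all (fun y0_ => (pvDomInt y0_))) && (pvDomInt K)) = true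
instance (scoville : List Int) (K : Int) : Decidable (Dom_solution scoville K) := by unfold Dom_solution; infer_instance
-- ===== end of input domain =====

-- B replaces A's binary heap with a sorted list maintained by ordered insertion (alternative data
-- structure, same return value). Both Pythons mutate the argument list in place; the equivalence
-- proved here is about the RETURN value only (A leaves heap order behind, B leaves sorted order).

-- ===== PORT A =====
-- Model of heapq used by A (hand-port, value-exact for A's uses of the module): after heapify /
-- between operations heap[0] is a minimal element, heappop returns that minimum and leaves the
-- remaining elements, heappush appends an element, heapify permutes the list in place. 'solution'
-- observes the heap only through its minimum and its multiset of elements, so these are exact;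
-- the .getD defaults are never taken on the nonempty heaps the loop maintains.

-- (termination helper for the loop below, cited by decreasing_by)
theorem pvPopLen {h : List Int} (hne : h ≠ []) :
    ((PySem.List.remove? h ((PySem.List.min? h (fun x => x)).getD 0)).getD []).length + 1 = h.length := by
  obtain ⟨m, hm⟩ : ∃ m, PySem.List.min? h (fun x => x) = some m := by
    cases hmx : PySem.List.min? h (fun x => x) with
    | none => exact absurd ((PySem.List.min?_eq_none_iff h _).mp hmx) hne
    | some x => exact ⟨x, rfl⟩
  have hmem : m ∈ h := PySem.List.min?_mem hm
  rw [hm, Option.getD_some, PySem.List.remove?_eq_some_erase h m hmem, Option.getD_some,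
    List.length_erase_of_mem hmem]
  have := List.length_pos_of_mem hmem
  omega

-- the 'while len(scoville) >= 2' loop of A
def solutionGo (h : List Int) (K : Int) (answer : Int) : Int :=
  if hl : 2 ≤ h.length then
    let s1 := (PySem.List.min? h (fun x => x)).getD 0          -- small1 = heappop(scoville)
    let h1 := (PySem.List.remove? h s1).getD []
    let s2 := (PySem.List.min? h1 (fun x => x)).getD 0         -- small2 = heappop(scoville)
    let h2 := (PySem.List.remove? h1 s2).getD []
    let h3 := h2 ++ [s1 + s2 * 2]                              -- heappush(scoville, new)
    if (PySem.List.min? h3 (fun x => x)).getD 0 ≥ K then answer + 1   -- scoville[0] >= K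
    else solutionGo h3 K (answer + 1)
  else -1
termination_by h.length
decreasing_by
  have e1 := pvPopLen (h := h) (by intro e; rw [e] at hl; simp at hl)
  have e2 := pvPopLen (h := (PySem.List.remove? h ((PySem.List.min? h (fun x => x)).getD 0)).getD [])
    (by intro e; rw [e] at e1; simp at e1; omega)
  simp only [List.length_append, List.length_singleton]
  omega

def solution (scoville : List Int) (K : Int) : Int :=
  match PySem.List.min? scoville (fun x => x) with  -- heapify(scoville); scoville[0]
  | none => 0  -- unreachable: scoville[0] raises IndexError on [], excluded by Pre_
  | some m => if m ≥ K then 0 else solutionGo scoville K 0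

-- ===== PORT B =====
-- the inner 'find i, scoville.insert(i, new)' of Source B: walk past the elements ≤ new, insert there
def linsert (ys : List Int) (new : Int) : List Int :=
  match ys with
  | [] => [new]
  | y :: t => if y ≤ new then y :: linsert t new else new :: y :: t

-- (termination helper for the loop below, cited by decreasing_by)
theorem pvLinsertLen (ys : List Int) (new : Int) : (linsert ys new).length = ys.length + 1 := by
  induction ys with
  | nil => rfl
  | cons y t ih => by_cases h : y ≤ new <;> simp [linsert, h, ih]

-- the 'while len(scoville) >= 2' loop of Source B (pop(0), pop(0) = the two head elements)
def altGo (s : List Int) (K : Int) (answer : Int) : Int :=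
  match s with
  | s1 :: s2 :: rest =>
    let ns := linsert rest (s1 + s2 * 2)
    if ns.headD 0 ≥ K then answer + 1   -- scoville[0] >= K (ns is never empty)
    else altGo ns K (answer + 1)
  | _ => -1
termination_by s.length
decreasing_by simp [pvLinsertLen]

def solution_alt (scoville : List Int) (K : Int) : Int :=
  match PySem.List.sorted scoville (fun x => x) false with  -- scoville.sort()
  | [] => 0  -- unreachable: scoville[0] raises IndexError on [], excluded by Pre_
  | m :: t => if m ≥ K then 0 else altGo (m :: t) K 0

-- ===== PRECONDITION & SPEC =====
-- Pre_ excludes only the empty list, on which both A and B raise IndexError (scoville[0]).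
def Pre_solution (scoville : List Int) (_K : Int) : Prop := scoville ≠ []
instance (scoville : List Int) (K : Int) : Decidable (Pre_solution scoville K) := by unfold Pre_solution; infer_instance
def pvWitness_solution : List Int × Int := ([1, 2, 3, 9, 10, 12], 7)

def Spec_solution (scoville : List Int) (K : Int) (out : Int) : Prop := out = solution_alt scoville K
instance (scoville : List Int) (K : Int) (out : Int) : Decidable (Spec_solution scoville K out) := by unfold Spec_solution; infer_instance

-- ===== CLAIM (what is proved, stated in full; the proofs are below) =====
def Claim_equal_solution : Prop := ∀ (scoville : List Int) (K : Int), Dom_solution scoville K → Pre_solution scoville K → Spec_solution scoville K (solution scoville K)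

-- ===== LEMMAS AND PROOFS =====

-- the minimum of any permutation of a sorted nonempty list is its head
theorem min?_eq_head {h t : List Int} {m : Int}
    (hp : h.Perm (m :: t)) (hs : (m :: t).Pairwise (· ≤ ·)) :
    PySem.List.min? h (fun x => x) = some m := by
  have hne : h ≠ [] := by
    intro e; subst e; simpa using hp.length_eq
  obtain ⟨x, hx⟩ : ∃ x, PySem.List.min? h (fun x => x) = some x := by
    cases hmx : PySem.List.min? h (fun x => x) with
    | none => exact absurd ((PySem.List.min?_eq_none_iff h _).mp hmx) hne
    | some x => exact ⟨x, rfl⟩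
  have hxm : x ∈ h := PySem.List.min?_mem hx
  have hxmin := PySem.List.min?_isMin hx
  have hmh : m ∈ h := hp.mem_iff.mpr List.mem_cons_self
  have h1 : x ≤ m := hxmin m hmh
  have h2 : m ≤ x := by
    rcases List.mem_cons.mp (hp.mem_iff.mp hxm) with hx' | hx'
    · exact le_of_eq hx'.symm
    · exact (List.pairwise_cons.mp hs).1 x hx'
  rw [hx, le_antisymm h1 h2]

-- popping the minimum of a permutation of a sorted list: the result and its permutation
theorem pop_min_step {h t : List Int} {m : Int}
    (hp : h.Perm (m :: t)) (hs : (m :: t).Pairwise (· ≤ ·)) :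
    (PySem.List.remove? h ((PySem.List.min? h (fun x => x)).getD 0)).getD [] = h.erase m ∧
    (h.erase m).Perm t := by
  have hmh : m ∈ h := hp.mem_iff.mpr List.mem_cons_self
  refine ⟨by rw [min?_eq_head hp hs, Option.getD_some,
      PySem.List.remove?_eq_some_erase h m hmh, Option.getD_some], ?_⟩
  have := hp.erase m
  rwa [List.erase_cons_head] at this

theorem linsert_perm (ys : List Int) (new : Int) : (linsert ys new).Perm (new :: ys) := by
  induction ys with
  | nil => simp [linsert]
  | cons y t ih =>
    by_cases h : y ≤ new
    · simpa [linsert, h] using ((ih.cons y).trans (List.Perm.swap new y t))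
    · simp [linsert, h]

theorem linsert_pairwise {ys : List Int} (new : Int) (hs : ys.Pairwise (· ≤ ·)) :
    (linsert ys new).Pairwise (· ≤ ·) := by
  induction ys with
  | nil => simp [linsert]
  | cons y t ih =>
    rcases List.pairwise_cons.mp hs with ⟨hy, ht⟩
    by_cases h : y ≤ new
    · simp only [linsert, if_pos h, List.pairwise_cons]
      refine ⟨fun z hz => ?_, ih ht⟩
      rcases List.mem_cons.mp ((linsert_perm t new).mem_iff.mp hz) with hz | hz
      · exact hz ▸ h
      · exact hy z hz
    · rw [not_le] at h
      simp only [linsert, if_neg (not_le.mpr h), List.pairwise_cons]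
      refine ⟨fun z hz => ?_, hy, ht⟩
      rcases List.mem_cons.mp hz with hz | hz
      · exact hz ▸ le_of_lt h
      · exact le_of_lt (lt_of_lt_of_le h (hy z hz))

-- the two loops agree on any permutation pair (heap multiset vs sorted list)
theorem go_eq (K : Int) (n : Nat) : ∀ (h s : List Int) (a : Int),
    h.length = n → h.Perm s → s.Pairwise (· ≤ ·) → solutionGo h K a = altGo s K a := by
  induction n using Nat.strong_induction_on with
  | _ n ih =>
    intro h s a hn hp hsort
    have hlen : h.length = s.length := hp.length_eq
    cases s with
    | nil =>
      rw [solutionGo, altGo]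
      simp only [List.length_nil] at hlen
      simp [hlen]
      exact fun _ _ _ hcon => by simp at hcon
    | cons s1 s' =>
      cases s' with
      | nil =>
        rw [solutionGo, altGo]
        simp only [List.length_cons, List.length_nil] at hlen
        simp [hlen]
        exact fun _ _ _ hcon => by simp at hcon
      | cons s2 rest =>
        obtain ⟨hr1, hp1⟩ := pop_min_step hp hsort
        have hsort1 : (s2 :: rest).Pairwise (· ≤ ·) := (List.pairwise_cons.mp hsort).2
        obtain ⟨hr2, hp2⟩ := pop_min_step hp1 hsort1
        have hm1 : PySem.List.min? h (fun x => x) = some s1 := min?_eq_head hp hsort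
        have hm2 : PySem.List.min? (h.erase s1) (fun x => x) = some s2 := min?_eq_head hp1 hsort1
        have h2 : 2 ≤ h.length := by simp at hlen; omega
        rw [hm1, Option.getD_some] at hr1
        rw [hm2, Option.getD_some] at hr2
        rw [solutionGo, dif_pos h2]
        simp only [hm1, hm2, Option.getD_some, hr1, hr2]
        have hpins : ((h.erase s1).erase s2 ++ [s1 + s2 * 2]).Perm (linsert rest (s1 + s2 * 2)) := by
          refine (List.perm_append_singleton _ _).trans (.trans ?_ (linsert_perm rest _).symm)
          exact hp2.cons _
        have hsins : (linsert rest (s1 + s2 * 2)).Pairwise (· ≤ ·) :=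
          linsert_pairwise _ (List.pairwise_cons.mp hsort1).2
        cases hns : linsert rest (s1 + s2 * 2) with
        | nil => exact absurd (pvLinsertLen rest (s1 + s2 * 2) ▸ congrArg List.length hns) (by simp)
        | cons m t =>
          rw [hns] at hpins hsins
          have hmin3 : PySem.List.min? ((h.erase s1).erase s2 ++ [s1 + s2 * 2]) (fun x => x) = some m :=
            min?_eq_head hpins hsins
          rw [altGo]
          simp only [hns, hmin3, Option.getD_some, List.headD_cons]
          by_cases hK : m ≥ K
          · rw [if_pos hK, if_pos hK]
          · rw [if_neg hK, if_neg hK]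
            have hlen3 : ((h.erase s1).erase s2 ++ [s1 + s2 * 2]).length < n := by
              have e1 : (h.erase s1).length + 1 = h.length := by
                rw [List.length_erase_of_mem (hp.mem_iff.mpr List.mem_cons_self)]
                omega
              have e2 : ((h.erase s1).erase s2).length + 1 = (h.erase s1).length := by
                rw [List.length_erase_of_mem (hp1.mem_iff.mpr List.mem_cons_self)]
                have := List.length_pos_of_mem (hp1.mem_iff.mpr (List.mem_cons_self (a := s2) (l := rest)))
                omega
              simp only [List.length_append, List.length_singleton]
              omega
            exact ih _ hlen3 _ _ _ rfl hpins hsins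

-- ===== VERDICT (by name: the statement is the Claim_ definition above) =====
theorem solution_spec : Claim_equal_solution := by
  unfold Claim_equal_solution
  intro scoville K _ hpre
  unfold Spec_solution solution solution_alt
  have hp : (PySem.List.sorted scoville (fun x => x) false).Perm scoville :=
    PySem.List.sorted_perm scoville (fun x => x) false
  have hs : (PySem.List.sorted scoville (fun x => x) false).Pairwise (· ≤ ·) :=
    PySem.List.sorted_pairwise scoville (fun x => x)
  cases hsorted : PySem.List.sorted scoville (fun x => x) false with
  | nil =>
    rw [hsorted] at hp
    exact absurd hp.symm.eq_nil hpre
  | cons m t =>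
    rw [hsorted] at hp hs
    rw [min?_eq_head hp.symm hs]
    show (if m ≥ K then 0 else solutionGo scoville K 0) = (if m ≥ K then 0 else altGo (m :: t) K 0)
    by_cases hK : m ≥ K
    · rw [if_pos hK, if_pos hK]
    · rw [if_neg hK, if_neg hK]
      exact go_eq K scoville.length scoville (m :: t) 0 rfl hp.symm hs
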